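-- pv_equiv track=rewrite | github.com/connectbot/connectbot | translations/translate.py | android_quote_text
-- ===== SOURCE A (Python) =====
-- from itertools import chain
--
-- WHITESPACE = " \n\t"
--
-- EOF = None
--
-- def android_quote_text(text: str) -> str:
--     """Quote text when Android would otherwise trim or collapse whitespace."""
--     needs_quoting = text.strip(WHITESPACE) != text
--
--     if not needs_quoting:
--         space_count = 0
--         for c in chain(text, [EOF]):
--             if c is not EOF and c in WHITESPACE:
--                 space_count += 1
--                 if space_count >= 2:
--                     needs_quoting = True
--                     break
--             else:
--                 space_count = 0
--
--     return f'"{text}"' if needs_quoting else text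
-- ===== SOURCE B (Python) =====
-- WHITESPACE = " \n\t"
--
--
-- def android_quote_text(text: str) -> str:
--     """Quote text when Android would otherwise trim or collapse whitespace."""
--     needs_quoting = text.strip(WHITESPACE) != text or any(
--         a in WHITESPACE and b in WHITESPACE for a, b in zip(text, text[1:])
--     )
--     return f'"{text}"' if needs_quoting else text
-- ===== Notes on version B (the rewrite author's own statement) =====
-- stated objective: idiomatic
-- what changed: Replaced A's chain/EOF-sentinel state machine (space_count counter with break) by a single boolean expression: the unchanged strip edge check or-ed with an any() over zip(text, text[1:]) testing adjacent whitespace pairs.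
import Mathlib
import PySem

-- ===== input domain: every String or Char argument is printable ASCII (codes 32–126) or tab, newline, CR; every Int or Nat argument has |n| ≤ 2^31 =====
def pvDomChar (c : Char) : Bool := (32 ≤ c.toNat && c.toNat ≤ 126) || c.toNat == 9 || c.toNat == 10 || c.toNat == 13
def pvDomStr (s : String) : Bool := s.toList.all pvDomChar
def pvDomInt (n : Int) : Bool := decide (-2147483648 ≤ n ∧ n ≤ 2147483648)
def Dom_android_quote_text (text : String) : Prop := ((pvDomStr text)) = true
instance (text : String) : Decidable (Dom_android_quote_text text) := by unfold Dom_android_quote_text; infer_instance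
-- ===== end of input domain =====

-- B replaces A's EOF-sentinel counter loop by one boolean expression over adjacent character pairs (idiomatic; same cost).

def WHITESPACE : String := " \n\t"

-- ===== PORT A =====
-- 'c in WHITESPACE' for a single character c is exactly list membership of c in WHITESPACE's characters.
-- The for-loop over chain(text, [EOF]) with its space_count state and early break:
def androidLoopA : List (Option Char) → Nat → Bool
  | [], _ => false
  | c :: rest, sc =>
    match c with
    | some ch =>
      if WHITESPACE.toList.contains ch then
        if sc + 1 ≥ 2 then true else androidLoopA rest (sc + 1)
      else androidLoopA rest 0
    | none => androidLoopA rest 0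

def android_quote_text (text : String) : String :=
  let needs_quoting := PySem.Str.stripChars text WHITESPACE != text
  let needs_quoting := if !needs_quoting then androidLoopA (text.toList.map some ++ [Option.none]) 0 else needs_quoting
  if needs_quoting then "\"" ++ text ++ "\"" else text

-- ===== PORT B =====
def android_quote_text_alt (text : String) : String :=
  let tl := text.toList
  let needs_quoting :=
    (PySem.Str.stripChars text WHITESPACE != text)
    || (tl.zip (PySem.List.slice tl (some 1) none)).any
         (fun p => WHITESPACE.toList.contains p.1 && WHITESPACE.toList.contains p.2)
  if needs_quoting then "\"" ++ text ++ "\"" else text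

-- ===== PRECONDITION & SPEC =====
def Spec_android_quote_text (text : String) (out : String) : Prop := out = android_quote_text_alt text
instance (text : String) (out : String) : Decidable (Spec_android_quote_text text out) := by unfold Spec_android_quote_text; infer_instance

-- ===== CLAIM (what is proved, stated in full; the proofs are below) =====
def Claim_equal_android_quote_text : Prop := ∀ (text : String), Dom_android_quote_text text → Spec_android_quote_text text (android_quote_text text)

-- ===== LEMMAS AND PROOFS =====

def pairAny (l : List Char) : Bool :=
  (l.zip (l.drop 1)).any (fun p => WHITESPACE.toList.contains p.1 && WHITESPACE.toList.contains p.2)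

lemma loopA_some (c : Char) (rest : List (Option Char)) (sc : Nat) :
    androidLoopA (some c :: rest) sc =
      if WHITESPACE.toList.contains c then
        (if sc + 1 ≥ 2 then true else androidLoopA rest (sc + 1))
      else androidLoopA rest 0 := rfl

lemma loopA_none (rest : List (Option Char)) (sc : Nat) :
    androidLoopA (Option.none :: rest) sc = androidLoopA rest 0 := rfl

lemma loopA_nil (sc : Nat) : androidLoopA [] sc = false := rfl

lemma pairAny_cons_cons (c d : Char) (r : List Char) :
    pairAny (c :: d :: r) =
      ((WHITESPACE.toList.contains c && WHITESPACE.toList.contains d) || pairAny (d :: r)) := by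
  simp [pairAny]

lemma pairAny_single (c : Char) : pairAny [c] = false := by simp [pairAny]

lemma pairAny_nil : pairAny [] = false := by simp [pairAny]

lemma loop_eq_pairAny (l : List Char) :
    androidLoopA (l.map some ++ [Option.none]) 0 = pairAny l ∧
    androidLoopA (l.map some ++ [Option.none]) 1 =
      ((match l with | [] => false | c :: _ => WHITESPACE.toList.contains c) || pairAny l) := by
  induction l with
  | nil => simp [loopA_none, loopA_nil, pairAny_nil]
  | cons c r ih =>
    obtain ⟨ih0, ih1⟩ := ih
    cases r with
    | nil =>
      by_cases hc : c ∈ WHITESPACE.toList <;>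
        simp [loopA_some, loopA_none, loopA_nil, pairAny_single, hc]
    | cons d r' =>
      by_cases hc : c ∈ WHITESPACE.toList <;> by_cases hd : d ∈ WHITESPACE.toList
      · constructor <;> simp [loopA_some, hc, hd, pairAny_cons_cons]
      · have e0 : androidLoopA (r'.map some ++ [Option.none]) 0 = pairAny (d :: r') := by
          rw [← ih0]; simp [loopA_some, hd]
        constructor <;> simp [loopA_some, hc, hd, e0, pairAny_cons_cons]
      · have e1 : androidLoopA (r'.map some ++ [Option.none]) 1 = pairAny (d :: r') := by
          rw [← ih0]; simp [loopA_some, hd]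
        constructor <;> simp [loopA_some, hc, hd, e1, pairAny_cons_cons]
      · have e0 : androidLoopA (r'.map some ++ [Option.none]) 0 = pairAny (d :: r') := by
          rw [← ih0]; simp [loopA_some, hd]
        constructor <;> simp [loopA_some, hc, hd, e0, pairAny_cons_cons]

lemma slice_one_eq_drop (tl : List Char) : PySem.List.slice tl (some 1) none = tl.drop 1 := by
  simpa using PySem.List.slice_from_one tl

-- ===== VERDICT (by name: the statement is the Claim_ definition above) =====
theorem android_quote_text_spec : Claim_equal_android_quote_text := by
  intro text _
  unfold Spec_android_quote_text android_quote_text android_quote_text_alt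
  have h := (loop_eq_pairAny text.toList).1
  by_cases hs : PySem.Str.stripChars text WHITESPACE = text
  · simp [hs, slice_one_eq_drop, h, pairAny]
  · simp [hs, slice_one_eq_drop]
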